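-- pv_equiv track=rewrite | github.com/Ka-raS/School-Code | Nam 2 Ky 2 - Lap trinh Python/142. TỔNG CHỮ SỐ - TÍCH CHỮ SỐ.py | sum_and_product
-- ===== SOURCE A (Python) =====
-- import typing
--
-- def sum_and_product(sequence: str) -> typing.Tuple[int, int]:
--     sum_even = 0
--     product_odd = 1
--     is_multiplied = False
--
--     for i, digit in enumerate(sequence):
--         value = ord(digit) - 48
--         if i % 2 == 0:
--             sum_even += value
--         elif value:
--             product_odd *= value
--             is_multiplied = True
--
--     return sum_even, is_multiplied * product_odd
-- ===== SOURCE B (Python) =====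
-- import typing
--
-- def sum_and_product(sequence: str) -> typing.Tuple[int, int]:
--     sum_even = sum(ord(d) - 48 for d in sequence[0::2])
--     vals = [ord(d) - 48 for d in sequence[1::2] if d != '0']
--     product = 1
--     for v in vals:
--         product *= v
--     return sum_even, product if vals else 0
-- ===== Notes on version B (the rewrite author's own statement) =====
-- stated objective: simpler
-- what changed: Replaces the single index-parity loop with three-state accumulator by splitting the string into the even and odd stride-2 slices, summing one and multiplying the nonzero values of the other, with an empty-list guard instead of the is_multiplied flag.
import Mathlib
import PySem

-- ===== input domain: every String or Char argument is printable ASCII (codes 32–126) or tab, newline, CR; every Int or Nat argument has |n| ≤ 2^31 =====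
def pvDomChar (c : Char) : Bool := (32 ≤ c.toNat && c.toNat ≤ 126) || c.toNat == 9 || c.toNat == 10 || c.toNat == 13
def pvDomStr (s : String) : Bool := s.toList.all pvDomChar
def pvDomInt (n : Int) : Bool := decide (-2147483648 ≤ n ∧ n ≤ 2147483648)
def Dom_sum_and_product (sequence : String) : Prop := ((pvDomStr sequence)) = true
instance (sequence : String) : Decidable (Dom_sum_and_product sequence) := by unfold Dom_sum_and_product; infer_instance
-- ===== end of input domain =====

-- B splits the string into the stride-2 even/odd slices and processes each separately
-- (sum one slice, multiply the nonzero values of the other); same results, plainer decomposition.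

-- ===== PORT A =====
-- the for-loop over enumerate(sequence), carrying (sum_even, product_odd, is_multiplied) and the index
def aLoop : List Char → Nat → Int × Int × Bool → Int × Int × Bool
  | [], _, st => st
  | c :: rest, i, (s, p, m) =>
    let value : Int := (c.toNat : Int) - 48
    if i % 2 = 0 then aLoop rest (i + 1) (s + value, p, m)
    else if value ≠ 0 then aLoop rest (i + 1) (s, p * value, true)
    else aLoop rest (i + 1) (s, p, m)

def sum_and_product (sequence : String) : Int × Int :=
  let st := aLoop sequence.toList 0 (0, 1, false)
  (st.1, (if st.2.2 then (1 : Int) else 0) * st.2.1)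

-- ===== PORT B =====
-- hand-ported step-2 slice: everyOther xs = xs[0::2]; xs[1::2] = everyOther xs.tail (exact for step 2, start 0/1)
def everyOther {α : Type} : List α → List α
  | [] => []
  | [c] => [c]
  | c :: _ :: rest => c :: everyOther rest

def sum_and_product_alt (sequence : String) : Int × Int :=
  let sumEven : Int := ((everyOther sequence.toList).map (fun d => (d.toNat : Int) - 48)).sum
  let vals : List Int := ((everyOther sequence.toList.tail).filter (fun d => d != '0')).map (fun d => (d.toNat : Int) - 48)
  let product : Int := vals.foldl (· * ·) 1
  (sumEven, if vals.isEmpty then 0 else product)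

-- ===== PRECONDITION & SPEC =====
def Spec_sum_and_product (sequence : String) (out : Int × Int) : Prop := out = sum_and_product_alt sequence
instance (sequence : String) (out : Int × Int) : Decidable (Spec_sum_and_product sequence out) := by unfold Spec_sum_and_product; infer_instance

-- ===== CLAIM (what is proved, stated in full; the proofs are below) =====
def Claim_equal_sum_and_product : Prop := ∀ (sequence : String), Dom_sum_and_product sequence → Spec_sum_and_product sequence (sum_and_product sequence)

-- ===== LEMMAS AND PROOFS =====
def pvVal (c : Char) : Int := (c.toNat : Int) - 48
def pvSum (xs : List Char) : Int := ((everyOther xs).map pvVal).sum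
def pvVals (xs : List Char) : List Int := ((everyOther xs).filter (fun d => d != '0')).map pvVal

lemma everyOther_cons {α : Type} (c : α) (t : List α) :
    everyOther (c :: t) = c :: everyOther t.tail := by
  cases t <;> simp [everyOther]

lemma pvVal_ne_zero_iff (c : Char) : pvVal c ≠ 0 ↔ (c != '0') = true := by
  constructor
  · intro h
    simp only [bne_iff_ne, ne_eq]
    rintro rfl
    simp [pvVal] at h
  · intro h hv
    have hn : c.toNat = 48 := by simp [pvVal] at hv; omega
    have : c = '0' := Char.ext (UInt32.toNat_inj.mp (by simpa using hn))
    simp [this] at h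

lemma aLoop_spec : ∀ (xs : List Char) (i : Nat) (s p : Int) (m : Bool),
    aLoop xs i (s, p, m) =
      if i % 2 = 0 then
        (s + pvSum xs, p * (pvVals xs.tail).prod, m || !(pvVals xs.tail).isEmpty)
      else
        (s + pvSum xs.tail, p * (pvVals xs).prod, m || !(pvVals xs).isEmpty) := by
  intro xs
  induction xs with
  | nil => intro i s p m; simp [aLoop, pvSum, pvVals, everyOther]
  | cons c t ih =>
    intro i s p m
    have hket : ((c :: t).tail) = t := rfl
    by_cases hi : i % 2 = 0
    · have hi1 : (i + 1) % 2 ≠ 0 := by omega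
      simp only [aLoop, hi, if_pos, ih (i + 1), if_neg hi1, hket]
      have hs : pvSum (c :: t) = ((c.toNat : Int) - 48) + pvSum t.tail := by
        simp [pvSum, everyOther_cons, pvVal]
      rw [hs]; ring_nf
    · have hi1 : (i + 1) % 2 = 0 := by omega
      by_cases hv : pvVal c ≠ 0
      · have hc : (c != '0') = true := (pvVal_ne_zero_iff c).mp hv
        simp only [aLoop, pvVal] at *
        rw [if_neg hi, if_pos hv, ih (i + 1), if_pos hi1, if_neg hi]
        have h1 : pvVals (c :: t) = pvVal c :: pvVals t.tail := by
          simp [pvVals, everyOther_cons, hc]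
        rw [h1]
        simp [hket, List.prod_cons, pvVal]
        ring_nf
      · have hv' : pvVal c = 0 := not_not.mp hv
        have hc : ¬ ((c != '0') = true) := by
          intro h; exact ((pvVal_ne_zero_iff c).mpr h) hv'
        simp only [aLoop]
        rw [if_neg hi, if_neg (by simp [pvVal] at hv' ⊢; omega), ih (i + 1), if_pos hi1, if_neg hi]
        have h1 : pvVals (c :: t) = pvVals t.tail := by
          simp [pvVals, everyOther_cons, hc]
        rw [h1, hket]

-- ===== VERDICT (by name: the statement is the Claim_ definition above) =====
theorem sum_and_product_spec : Claim_equal_sum_and_product := by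
  intro sequence _
  unfold Spec_sum_and_product sum_and_product sum_and_product_alt
  rw [aLoop_spec sequence.toList 0 0 1 false]
  simp only [Nat.zero_mod, if_pos]
  have hvals : pvVals sequence.toList.tail =
      List.map (fun d => ((d.toNat : Int) - 48)) (List.filter (fun d => d != '0') (everyOther sequence.toList.tail)) := rfl
  have hsum : pvSum sequence.toList =
      (List.map (fun d => ((d.toNat : Int) - 48)) (everyOther sequence.toList)).sum := rfl
  rw [← hvals, ← hsum]
  by_cases hE : (pvVals sequence.toList.tail).isEmpty = true
  · simp [List.isEmpty_iff.mp hE]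
  · simp [hE, List.prod_eq_foldl]
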